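-- pv_equiv track=rewrite | github.com/SIDED00R/Code_training | 프로그래머스/2/150368. 이모티콘 할인행사/이모티콘 할인행사.py | solution
-- ===== SOURCE A (Python) =====
-- from itertools import product
--
-- def solution(users, emoticons):
--     N = len(emoticons)
--     rate = [10, 20, 30, 40]
--     price_rate = list(product(rate, repeat = N))
--     max_count = 0
--     max_total = 0
--
--     for case in price_rate:
--         price = []
--         for i in range(N):
--             price.append((100 - case[i]) * emoticons[i] // 100)
--         count = 0
--         total = 0
--         for user in users:
--             buy = 0
--             for idx in range(len(case)):
--                 if user[0] <= case[idx]: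
--                     buy += price[idx]
--             if buy >= user[1]:
--                 buy = 0
--                 count += 1
--             total += buy
--
--         if count > max_count:
--             max_count = count
--             max_total = total
--         elif count == max_count and max_total < total:
--             max_total = total
--
--     return [max_count, max_total]
-- ===== SOURCE B (Python) =====
-- def solution(users, emoticons):
--     def evaluate(case):
--         priced = [(r, (100 - r) * e // 100) for r, e in zip(case, emoticons)]
--         count = 0
--         total = 0
--         for user in users:
--             buy = sum(p for r, p in priced if user[0] <= r)
--             if buy >= user[1]:
--                 count += 1
--             else:
--                 total += buy
--         return (count, total)
--
--     def dfs(case, rest, best):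
--         if not rest:
--             return max(best, evaluate(case))
--         for r in (10, 20, 30, 40):
--             best = dfs(case + [r], rest[1:], best)
--         return best
--
--     c, t = dfs([], emoticons, (0, 0))
--     return [c, t]
-- ===== Notes on version B (the rewrite author's own statement) =====
-- stated objective: alternative
-- what changed: The flat itertools.product loop with two index-driven inner loops is replaced by a recursive DFS that builds one rate assignment at a time and threads the running best as a lexicographic max of (count, total), scoring each case by zipping rates with emoticon prices and summing a filtered list instead of indexing.
import Mathlib
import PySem

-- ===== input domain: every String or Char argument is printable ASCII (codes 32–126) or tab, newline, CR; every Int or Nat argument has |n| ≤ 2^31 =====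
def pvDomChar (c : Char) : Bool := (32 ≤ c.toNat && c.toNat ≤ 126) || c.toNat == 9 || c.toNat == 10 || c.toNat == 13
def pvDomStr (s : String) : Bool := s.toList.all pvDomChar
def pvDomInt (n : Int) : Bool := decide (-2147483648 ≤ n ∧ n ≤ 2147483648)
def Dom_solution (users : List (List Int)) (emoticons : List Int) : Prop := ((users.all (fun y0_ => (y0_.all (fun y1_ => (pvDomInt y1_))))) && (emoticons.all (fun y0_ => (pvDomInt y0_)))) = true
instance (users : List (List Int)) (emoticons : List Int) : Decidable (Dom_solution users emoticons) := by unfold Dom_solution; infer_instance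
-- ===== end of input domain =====

-- B replaces A's flat itertools.product enumeration with a recursive DFS that threads the
-- running best as a lexicographic max and scores each case by zip/filter (objective: alternative).

-- ===== PORT A =====
-- itertools.product([10,20,30,40], repeat = n) in itertools' order (leftmost varies slowest)
def priceRateA (rate : List Int) : Nat → List (List Int)
  | 0 => [[]]
  | n + 1 => rate.flatMap (fun r => (priceRateA rate n).map (fun c => r :: c))

-- `price = []; for i in range(N): price.append((100 - case[i]) * emoticons[i] // 100)`;
-- List.getD is exact here: every index of the loops below is in range
def priceA (emoticons case : List Int) : List Int :=
  (List.range emoticons.length).foldl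
    (fun acc i => acc ++ [PySem.Int.floordiv ((100 - case.getD i 0) * emoticons.getD i 0) 100]) []

-- body of A's `for user in users` loop; user[0]/user[1] exist under Pre_solution
def userStepA (case price : List Int) (ct : Int × Int) (user : List Int) : Int × Int :=
  let buy := (List.range case.length).foldl
    (fun buy idx => if user.getD 0 0 ≤ case.getD idx 0 then buy + price.getD idx 0 else buy) 0
  if buy ≥ user.getD 1 0 then (ct.1 + 1, ct.2) else (ct.1, ct.2 + buy)

-- body of A's `for case in price_rate` loop, updating (max_count, max_total)
def stepA (users : List (List Int)) (emoticons : List Int) (b : Int × Int) (case : List Int) : Int × Int :=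
  let ct := users.foldl (userStepA case (priceA emoticons case)) (0, 0)
  if ct.1 > b.1 then ct
  else if ct.1 = b.1 ∧ b.2 < ct.2 then (b.1, ct.2) else b

def solution (users : List (List Int)) (emoticons : List Int) : List Int :=
  let best := (priceRateA [10, 20, 30, 40] emoticons.length).foldl (stepA users emoticons) (0, 0)
  [best.1, best.2]

-- ===== PORT B =====
-- priced = [(r, (100 - r) * e // 100) for r, e in zip(case, emoticons)]
def pricedOf (case emoticons : List Int) : List (Int × Int) :=
  (case.zip emoticons).map (fun p => (p.1, PySem.Int.floordiv ((100 - p.1) * p.2) 100))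

-- body of B's `for user in users` loop; user[0]/user[1] exist under Pre_solution
def userStepB (priced : List (Int × Int)) (ct : Int × Int) (user : List Int) : Int × Int :=
  let buy := ((priced.filter (fun p => user.getD 0 0 ≤ p.1)).map (fun p => p.2)).sum
  if buy ≥ user.getD 1 0 then (ct.1 + 1, ct.2) else (ct.1, ct.2 + buy)

-- B's evaluate(case)
def evaluateAlt (users : List (List Int)) (priced : List (Int × Int)) : Int × Int :=
  users.foldl (userStepB priced) (0, 0)

-- Python's max on int pairs: lexicographic, keeps the first argument on ties
def lexMax (a b : Int × Int) : Int × Int :=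
  if a.1 < b.1 ∨ (a.1 = b.1 ∧ a.2 < b.2) then b else a

def dfsAlt (users : List (List Int)) (emoticons : List Int) (case : List Int) :
    List Int → Int × Int → Int × Int
  | [], best => lexMax best (evaluateAlt users (pricedOf case emoticons))
  | _ :: rest, best => ([10, 20, 30, 40] : List Int).foldl
      (fun b r => dfsAlt users emoticons (case ++ [r]) rest b) best

def solution_alt (users : List (List Int)) (emoticons : List Int) : List Int :=
  let best := dfsAlt users emoticons [] emoticons (0, 0)
  [best.1, best.2]

-- ===== PRECONDITION & SPEC =====
-- A evaluates user[0]/user[1] for every user, so it raises IndexError exactly when some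
-- user list has fewer than 2 elements; those inputs (where B raises too) are excluded.
def Pre_solution (users : List (List Int)) (emoticons : List Int) : Prop :=
  ∀ u ∈ users, 2 ≤ u.length
instance (users : List (List Int)) (emoticons : List Int) : Decidable (Pre_solution users emoticons) := by unfold Pre_solution; infer_instance

def pvWitness_solution : List (List Int) × List Int := ([[40, 2300], [25, 1000]], [7000, 9000])

def Spec_solution (users : List (List Int)) (emoticons : List Int) (out : List Int) : Prop := out = solution_alt users emoticons
instance (users : List (List Int)) (emoticons : List Int) (out : List Int) : Decidable (Spec_solution users emoticons out) := by unfold Spec_solution; infer_instance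

-- ===== CLAIM (what is proved, stated in full; the proofs are below) =====
def Claim_equal_solution : Prop := ∀ (users : List (List Int)) (emoticons : List Int), Dom_solution users emoticons → Pre_solution users emoticons → Spec_solution users emoticons (solution users emoticons)

-- ===== LEMMAS AND PROOFS =====

-- filter-then-sum equals the sum of an if-guarded map
theorem sum_filter_map_eq (l : List (Int × Int)) (p : Int × Int → Bool) :
    ((l.filter p).map (fun x => x.2)).sum = (l.map (fun x => if p x then x.2 else 0)).sum := by
  induction l with
  | nil => simp
  | cons x xs ih => simp [List.filter_cons]; split <;> simp [ih]

-- a sum indexed over range equals the sum over the zipped lists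
theorem sum_range_zip (g : Int → Int → Int) : ∀ (cs es : List Int), cs.length = es.length →
    ((List.range cs.length).map (fun i => g (cs.getD i 0) (es.getD i 0))).sum
      = ((cs.zip es).map (fun p => g p.1 p.2)).sum := by
  intro cs
  induction cs with
  | nil => intro es h; simp
  | cons c cs ih =>
    intro es h
    cases es with
    | nil => simp at h
    | cons e es =>
      simp only [List.length_cons, List.range_succ_eq_map, List.map_cons, List.map_map,
        List.zip_cons_cons, List.sum_cons]
      have hmap : ((fun i => g ((c :: cs).getD i 0) ((e :: es).getD i 0)) ∘ Nat.succ)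
          = fun i => g (cs.getD i 0) (es.getD i 0) := by
        funext i; simp
      rw [hmap, ih es (by simpa using h)]
      simp

-- per-user step: A's indexed buy-loop equals B's filtered sum over the priced pairs
theorem userStep_eq (emoticons case : List Int) (hlen : case.length = emoticons.length)
    (ct : Int × Int) (user : List Int) :
    userStepA case (priceA emoticons case) ct user
      = userStepB (pricedOf case emoticons) ct user := by
  unfold userStepA userStepB priceA
  rw [PySem.List.foldl_append_singleton_eq_map, List.nil_append]
  have hfn : (fun (buy : Int) (idx : Nat) => if user.getD 0 0 ≤ case.getD idx 0
      then buy + ((List.range emoticons.length).map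
        (fun i => PySem.Int.floordiv ((100 - case.getD i 0) * emoticons.getD i 0) 100)).getD idx 0
      else buy)
      = (fun (buy : Int) (idx : Nat) => buy + (if user.getD 0 0 ≤ case.getD idx 0
      then ((List.range emoticons.length).map
        (fun i => PySem.Int.floordiv ((100 - case.getD i 0) * emoticons.getD i 0) 100)).getD idx 0
      else 0)) := by
    funext buy idx; split <;> simp
  rw [hfn, PySem.List.foldl_add, zero_add]
  have hmapc : (List.range case.length).map (fun idx => if user.getD 0 0 ≤ case.getD idx 0
      then ((List.range emoticons.length).map
        (fun i => PySem.Int.floordiv ((100 - case.getD i 0) * emoticons.getD i 0) 100)).getD idx 0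
      else 0)
      = (List.range case.length).map (fun idx =>
          (fun c e => if user.getD 0 0 ≤ c then PySem.Int.floordiv ((100 - c) * e) 100 else 0)
            (case.getD idx 0) (emoticons.getD idx 0)) := by
    apply List.map_congr_left
    intro idx hidx
    rw [List.mem_range] at hidx
    rw [PySem.List.getD_map_range _ emoticons.length idx 0 (by omega)]
  rw [hmapc, sum_range_zip
    (fun c e => if user.getD 0 0 ≤ c then PySem.Int.floordiv ((100 - c) * e) 100 else 0)
    case emoticons hlen, sum_filter_map_eq]
  simp [pricedOf, Function.comp_def]

-- per-case score + best-update: A's loop body is a lexicographic max against B's score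
theorem score_eq (users : List (List Int)) (emoticons : List Int) (case : List Int)
    (hlen : case.length = emoticons.length) (b : Int × Int) :
    stepA users emoticons b case
      = lexMax b (evaluateAlt users (pricedOf case emoticons)) := by
  unfold stepA evaluateAlt
  rw [PySem.List.foldl_congr_mem users (userStepA case (priceA emoticons case))
    (userStepB (pricedOf case emoticons)) (0, 0)
    (fun ct user _ => userStep_eq emoticons case hlen ct user)]
  generalize users.foldl (userStepB (pricedOf case emoticons)) (0, 0) = ct
  obtain ⟨c1, c2⟩ := ct
  obtain ⟨b1, b2⟩ := b
  simp only [lexMax]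
  split_ifs <;> simp_all <;> omega

-- every member of itertools.product has the repeat length
theorem priceRateA_length (rate : List Int) : ∀ n case, case ∈ priceRateA rate n → case.length = n := by
  intro n
  induction n with
  | zero => intro c h; simp [priceRateA] at h; simp [h]
  | succ n ih =>
    intro c h
    simp only [priceRateA, List.mem_flatMap, List.mem_map] at h
    obtain ⟨r, _, t, ht, rfl⟩ := h
    simp [ih t ht]

-- the DFS is the fold of lexMax over the product list
theorem dfsAlt_eq_foldl (users : List (List Int)) (emoticons : List Int) :
    ∀ (rest : List Int) (case : List Int) (best : Int × Int),
    dfsAlt users emoticons case rest best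
      = (priceRateA [10, 20, 30, 40] rest.length).foldl
          (fun b tail => lexMax b (evaluateAlt users (pricedOf (case ++ tail) emoticons))) best := by
  intro rest
  induction rest with
  | nil => intro case best; simp [dfsAlt, priceRateA]
  | cons x rest ih =>
    intro case best
    simp only [dfsAlt, List.length_cons, priceRateA]
    simp only [List.flatMap_cons, List.flatMap_nil, List.foldl_cons, List.foldl_nil,
      List.foldl_append, List.append_nil, List.foldl_map, ih, ← List.append_cons]

-- ===== VERDICT (by name: the statement is the Claim_ definition above) =====
theorem solution_spec : Claim_equal_solution := by
  intro users emoticons _ _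
  unfold Spec_solution solution solution_alt
  rw [dfsAlt_eq_foldl]
  have : (priceRateA [10, 20, 30, 40] emoticons.length).foldl (stepA users emoticons) (0, 0)
      = (priceRateA [10, 20, 30, 40] emoticons.length).foldl
          (fun b tail => lexMax b (evaluateAlt users (pricedOf ([] ++ tail) emoticons))) (0, 0) := by
    apply PySem.List.foldl_congr_mem
    intro b tail ht
    simpa using score_eq users emoticons tail (priceRateA_length _ _ _ ht) b
  rw [this]
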